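-- pv_equiv track=rewrite | github.com/oooozi/band_matcher | utils.py | assign_schedule_participant
-- ===== SOURCE A (Python) =====
-- def assign_schedule_participant(
--     schedule: dict,
--     person_role: dict,
--     persons_availability: dict
-- ) -> dict:
--     schedule_participant = {}
--
--     for time in sorted(schedule):
--         schedule_participant[time] = []
--
--         for song, _, _ in schedule[time]:
--             participants = []
--             absentees = []
--
--             for person, roles in person_role.items():
--                 for s, session in roles:
--                     if s == song:
--                         entry = f"{person}({session})"
--                         if time in persons_availability.get(person, []):
--                             participants.append(entry)
--                         else:
--                             absentees.append(entry)
--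
--             schedule_participant[time].append({
--                 song: [participants, absentees] # 리스트[0] -> 참여자, 리스트[1] -> 불참자
--             })
--
--     return schedule_participant
-- ===== SOURCE B (Python) =====
-- def assign_schedule_participant(
--     schedule: dict,
--     person_role: dict,
--     persons_availability: dict
-- ) -> dict:
--     # Build once: song -> [(entry_string, availability_set), ...] in person/role order.
--     song_entries = {}
--     for person, roles in person_role.items():
--         avail = set(persons_availability.get(person, []))
--         for s, session in roles:
--             song_entries.setdefault(s, []).append((f"{person}({session})", avail))
--
--     # Build the result declaratively: for each (time, song), participants and
--     # absentees are two order-preserving filters over the song's indexed entries.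
--     return {
--         time: [
--             {song: [[e for e, av in song_entries.get(song, []) if time in av],
--                     [e for e, av in song_entries.get(song, []) if time not in av]]}
--             for song, _, _ in schedule[time]
--         ]
--         for time in sorted(schedule)
--     }
-- ===== Notes on version B (the rewrite author's own statement) =====
-- stated objective: faster
-- what changed: Instead of rescanning every person's whole role list (and rescanning their availability list) for every song of every time slot while partitioning with two mutable accumulators, B builds once a song->[(entry, availability-set)] index and then constructs the result as nested comprehensions in which participants/absentees are two order-preserving filters over the matching entries with O(1) set membership.
import Mathlib
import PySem

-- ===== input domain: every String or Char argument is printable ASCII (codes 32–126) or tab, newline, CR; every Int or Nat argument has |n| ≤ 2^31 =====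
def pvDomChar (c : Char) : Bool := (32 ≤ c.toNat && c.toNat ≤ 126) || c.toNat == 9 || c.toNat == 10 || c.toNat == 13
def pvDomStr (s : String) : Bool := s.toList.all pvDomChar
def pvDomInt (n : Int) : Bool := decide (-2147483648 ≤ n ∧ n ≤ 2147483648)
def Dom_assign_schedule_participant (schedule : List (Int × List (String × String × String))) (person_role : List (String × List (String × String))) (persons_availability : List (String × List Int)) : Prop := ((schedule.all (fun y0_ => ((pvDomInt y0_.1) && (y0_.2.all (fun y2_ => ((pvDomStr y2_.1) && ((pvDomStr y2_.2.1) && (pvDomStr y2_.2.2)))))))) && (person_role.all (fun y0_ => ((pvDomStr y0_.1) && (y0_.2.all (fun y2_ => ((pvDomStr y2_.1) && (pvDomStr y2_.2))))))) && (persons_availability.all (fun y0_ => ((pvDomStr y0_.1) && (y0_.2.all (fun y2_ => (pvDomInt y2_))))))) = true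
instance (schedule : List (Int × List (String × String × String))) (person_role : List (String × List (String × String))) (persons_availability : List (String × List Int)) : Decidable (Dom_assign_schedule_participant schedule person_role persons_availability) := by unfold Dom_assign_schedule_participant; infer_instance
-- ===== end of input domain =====

-- B replaces A's per-(time,song) rescan of all persons/roles/availability lists (partitioning
-- with two mutable accumulators) by a song→entries index with availability sets built once,
-- and builds the result as nested comprehensions whose participant/absentee lists are two
-- order-preserving filters over the matching entries (objective: faster, asymptotic).

-- shared helper: the f-string f"{person}({session})"
def pyEntry (person session : String) : String := person ++ "(" ++ session ++ ")"

-- ===== PORT A =====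
def assign_schedule_participant (schedule : List (Int × List (String × String × String))) (person_role : List (String × List (String × String))) (persons_availability : List (String × List Int)) : List (Int × List (List (String × List (List String)))) :=
  let sd := PySem.Dict.ofList schedule
  let pr := PySem.Dict.ofList person_role
  let pa := PySem.Dict.ofList persons_availability
  (PySem.List.sorted sd.keys (fun x => x) false).foldl (fun sp time =>
    let row := (sd.getD time []).foldl (fun row tri =>
      let pares := pr.items.foldl (fun (acc : List String × List String) prow =>
        prow.2.foldl (fun (acc : List String × List String) r =>
          if r.1 == tri.1 then
            if (pa.getD prow.1 []).contains time then (acc.1 ++ [pyEntry prow.1 r.2], acc.2)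
            else (acc.1, acc.2 ++ [pyEntry prow.1 r.2])
          else acc) acc) ([], [])
      row ++ [[(tri.1, [pares.1, pares.2])]]) []
    sp ++ [(time, row)]) []

-- ===== PORT B =====
def assign_schedule_participant_alt (schedule : List (Int × List (String × String × String))) (person_role : List (String × List (String × String))) (persons_availability : List (String × List Int)) : List (Int × List (List (String × List (List String)))) :=
  let sd := PySem.Dict.ofList schedule
  let pr := PySem.Dict.ofList person_role
  let pa := PySem.Dict.ofList persons_availability
  let idx : PySem.Dict String (List (String × PySem.Set Int)) :=
    pr.items.foldl (fun d prow =>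
      let avail := PySem.Set.ofList (pa.getD prow.1 [])
      prow.2.foldl (fun d r =>
        d.modify r.1 [] (fun l => l ++ [(pyEntry prow.1 r.2, avail)])) d) PySem.Dict.empty
  (PySem.List.sorted sd.keys (fun x => x) false).map (fun time =>
    (time, (sd.getD time []).map (fun tri =>
      [(tri.1, [((idx.getD tri.1 []).filter (fun e => e.2.contains time)).map (·.1),
                ((idx.getD tri.1 []).filter (fun e => !e.2.contains time)).map (·.1)])])))

-- ===== PRECONDITION & SPEC =====
def Spec_assign_schedule_participant (schedule : List (Int × List (String × String × String))) (person_role : List (String × List (String × String))) (persons_availability : List (String × List Int)) (out : List (Int × List (List (String × List (List String))))) : Prop := out = assign_schedule_participant_alt schedule person_role persons_availability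
instance (schedule : List (Int × List (String × String × String))) (person_role : List (String × List (String × String))) (persons_availability : List (String × List Int)) (out : List (Int × List (List (String × List (List String))))) : Decidable (Spec_assign_schedule_participant schedule person_role persons_availability out) := by unfold Spec_assign_schedule_participant; infer_instance

-- ===== CLAIM =====
def Claim_equal_assign_schedule_participant : Prop := ∀ (schedule : List (Int × List (String × String × String))) (person_role : List (String × List (String × String))) (persons_availability : List (String × List Int)), Dom_assign_schedule_participant schedule person_role persons_availability → Spec_assign_schedule_participant schedule person_role persons_availability (assign_schedule_participant schedule person_role persons_availability)

-- ===== LEMMAS AND PROOFS =====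

-- a foldl that only appends one produced element per input is a map
theorem pv_foldl_app {α β : Type} (l : List α) (f : α → β) (init : List β) :
    l.foldl (fun acc x => acc ++ [f x]) init = init ++ l.map f := by
  induction l generalizing init with
  | nil => simp
  | cons x l ih => simp [ih]

-- a two-accumulator partitioning foldl is a pair of order-preserving filters
theorem pv_partition {α β : Type} (l : List α) (p : α → Bool) (g : α → β) (a b : List β) :
    l.foldl (fun acc e => if p e then (acc.1 ++ [g e], acc.2) else (acc.1, acc.2 ++ [g e])) (a, b)
      = (a ++ (l.filter p).map g, b ++ (l.filter (fun e => !p e)).map g) := by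
  induction l generalizing a b with
  | nil => simp
  | cons x l ih => by_cases h : p x <;> simp [h, ih]

-- the flattened keyed stream of entries B's index is built from
def pvStream (pr : PySem.Dict String (List (String × String))) (pa : PySem.Dict String (List Int)) : List (String × (String × PySem.Set Int)) :=
  pr.items.flatMap (fun prow =>
    prow.2.map (fun r => (r.1, (pyEntry prow.1 r.2, PySem.Set.ofList (pa.getD prow.1 [])))))

-- getD of a dict built by appending each keyed element to its key's bucket
theorem pv_getD_modify_fold (s : List (String × (String × PySem.Set Int)))
    (d : PySem.Dict String (List (String × PySem.Set Int))) (k : String) :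
    (s.foldl (fun d kx => d.modify kx.1 [] (fun l => l ++ [kx.2])) d).getD k []
      = d.getD k [] ++ (s.filter (fun kx => kx.1 == k)).map (·.2) := by
  induction s generalizing d with
  | nil => simp
  | cons kx s ih =>
      have hm : ∀ (d : PySem.Dict String (List (String × PySem.Set Int))),
          (d.modify kx.1 [] (fun l => l ++ [kx.2])).getD k []
            = if k = kx.1 then d.getD kx.1 [] ++ [kx.2] else d.getD k [] := by
        intro d; simp [PySem.Dict.modify, PySem.Dict.getD_insert]
      rw [List.foldl_cons, ih, hm, List.filter_cons]
      by_cases h : kx.1 = k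
      · subst h; simp
      · have hb : (kx.1 == k) = false := by simpa using h
        simp [hb, Ne.symm h]

-- B's index bucket for a song is exactly the matching part of the stream
theorem pv_idx_getD (pr : PySem.Dict String (List (String × String))) (pa : PySem.Dict String (List Int)) (song : String) :
    (pr.items.foldl (fun d prow =>
        prow.2.foldl (fun d r =>
          PySem.Dict.modify d r.1 [] (fun l => l ++ [(pyEntry prow.1 r.2, PySem.Set.ofList (pa.getD prow.1 []))])) d)
        (PySem.Dict.empty : PySem.Dict String (List (String × PySem.Set Int)))).getD song []
      = ((pvStream pr pa).filter (fun kx => kx.1 == song)).map (·.2) := by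
  have h1 : (pr.items.foldl (fun d prow =>
        prow.2.foldl (fun d r =>
          PySem.Dict.modify d r.1 [] (fun l => l ++ [(pyEntry prow.1 r.2, PySem.Set.ofList (pa.getD prow.1 []))])) d)
        (PySem.Dict.empty : PySem.Dict String (List (String × PySem.Set Int))))
      = (pvStream pr pa).foldl (fun d kx => d.modify kx.1 [] (fun l => l ++ [kx.2])) PySem.Dict.empty := by
    rw [pvStream, List.foldl_flatMap]
    simp only [List.foldl_map]
  rw [h1, pv_getD_modify_fold]
  simp [PySem.Dict.getD, PySem.Dict.get?, PySem.Dict.empty]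

-- set membership test equals list membership test
theorem pv_contains_ofList (l : List Int) (t : Int) : (PySem.Set.ofList l).contains t = l.contains t := by
  simp [PySem.Set.contains_eq_listContains]

-- A's per-(time, song) nested partitioning fold equals a partitioning fold over the stream's bucket
theorem pv_inner_eq (pr : PySem.Dict String (List (String × String))) (pa : PySem.Dict String (List Int))
    (song : String) (time : Int) :
    pr.items.foldl (fun (acc : List String × List String) prow =>
        prow.2.foldl (fun (acc : List String × List String) r =>
          if r.1 == song then
            if (pa.getD prow.1 []).contains time then (acc.1 ++ [pyEntry prow.1 r.2], acc.2)
            else (acc.1, acc.2 ++ [pyEntry prow.1 r.2])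
          else acc) acc) (([], []) : List String × List String)
      = (((pvStream pr pa).filter (fun kx => kx.1 == song)).map (·.2)).foldl
          (fun (acc : List String × List String) e =>
            if e.2.contains time then (acc.1 ++ [e.1], acc.2) else (acc.1, acc.2 ++ [e.1])) ([], []) := by
  rw [List.foldl_map, List.foldl_filter, pvStream, List.foldl_flatMap]
  simp only [List.foldl_map, pv_contains_ofList]

-- ===== VERDICT =====
theorem assign_schedule_participant_spec : Claim_equal_assign_schedule_participant := by
  intro schedule person_role persons_availability _
  unfold Spec_assign_schedule_participant
  unfold assign_schedule_participant assign_schedule_participant_alt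
  simp only [pv_foldl_app, List.nil_append]
  congr 1
  funext time
  simp only [Prod.mk.injEq, true_and]
  congr 1
  funext tri
  rw [pv_inner_eq, pv_idx_getD, pv_partition]
  simp
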